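-- pv_equiv track=rewrite | github.com/PromaChow/Wordless | wordless/wl_nlp/wl_nlp_utils.py | to_sections
-- ===== SOURCE A (Python) =====
-- def to_sections(tokens, num_sections):
--     len_tokens = len(tokens)
--
--     if len_tokens >= num_sections:
--         sections = []
--
--         section_size, remainder = divmod(len_tokens, num_sections)
--
--         for i in range(num_sections):
--             if i < remainder:
--                 section_start = i * section_size + i
--             else:
--                 section_start = i * section_size + remainder
--
--             if i + 1 < remainder:
--                 section_stop = (i + 1) * section_size + i + 1
--             else:
--                 section_stop = (i + 1) * section_size + remainder
--
--             sections.append(tokens[section_start:section_stop])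
--     else:
--         sections = [[token] for token in tokens]
--
--     return sections
-- ===== SOURCE B (Python) =====
-- def to_sections(tokens, num_sections):
--     if len(tokens) < num_sections:
--         return [[token] for token in tokens]
--     sections = []
--     it = iter(tokens)
--     remaining = len(tokens)
--     k = num_sections
--     while k > 0:
--         size = (remaining + k - 1) // k
--         sections.append([next(it) for _ in range(size)])
--         remaining -= size
--         k -= 1
--     return sections
-- ===== Notes on version B (the rewrite author's own statement) =====
-- stated objective: alternative
-- what changed: Replaces A's loop of closed-form per-section start/stop index formulas (after one divmod) by a shrinking-problem peel that consumes an iterator: each step takes ceil(remaining/k) next elements and decrements k, with no divmod, no remainder bookkeeping and no index arithmetic over the original list.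
import Mathlib
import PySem

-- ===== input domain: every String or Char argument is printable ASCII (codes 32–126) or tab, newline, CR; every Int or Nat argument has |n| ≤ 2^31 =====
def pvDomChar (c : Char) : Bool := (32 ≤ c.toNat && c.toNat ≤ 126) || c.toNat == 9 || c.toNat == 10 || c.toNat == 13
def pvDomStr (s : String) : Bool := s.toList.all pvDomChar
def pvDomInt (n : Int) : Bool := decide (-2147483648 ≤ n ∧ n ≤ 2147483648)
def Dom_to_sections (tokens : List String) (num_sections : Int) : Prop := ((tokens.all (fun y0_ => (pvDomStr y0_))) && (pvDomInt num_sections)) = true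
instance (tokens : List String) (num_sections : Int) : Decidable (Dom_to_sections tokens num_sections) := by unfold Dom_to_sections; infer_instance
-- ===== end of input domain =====

-- B replaces A's index-arithmetic loop by a recursive peel: take one ceil-sized chunk, recurse on the rest; objective: simpler.

-- ===== PORT A =====
def to_sections (tokens : List String) (num_sections : Int) : List (List String) :=
  let len_tokens : Int := tokens.length
  if len_tokens ≥ num_sections then
    let section_size := PySem.Int.floordiv len_tokens num_sections
    let remainder := PySem.Int.mod len_tokens num_sections
    (PySem.List.pyRange 0 num_sections 1).foldl (fun sections i =>
      let section_start := if i < remainder then i * section_size + i else i * section_size + remainder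
      let section_stop := if i + 1 < remainder then (i + 1) * section_size + i + 1 else (i + 1) * section_size + remainder
      sections ++ [PySem.List.slice tokens (some section_start) (some section_stop)]) []
  else
    tokens.map (fun token => [token])

-- ===== PORT B =====
-- Source B's while loop: rest models the unconsumed suffix of the iterator 'it';
-- '[next(it) for _ in range(size)]' is rest.take size.toNat (exact: 0 <= size <= len rest
-- holds on every iteration actually reached from to_sections_alt's call)
def pvChunksLoop (sections : List (List String)) (rest : List String) (remaining k : Int) : List (List String) :=
  if k ≤ 0 then sections
  else
    let size := PySem.Int.floordiv (remaining + k - 1) k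
    pvChunksLoop (sections ++ [rest.take size.toNat]) (rest.drop size.toNat) (remaining - size) (k - 1)
termination_by k.toNat
decreasing_by omega

def to_sections_alt (tokens : List String) (num_sections : Int) : List (List String) :=
  if (tokens.length : Int) < num_sections then
    tokens.map (fun token => [token])
  else
    pvChunksLoop [] tokens (tokens.length : Int) num_sections

-- ===== PRECONDITION & SPEC =====
-- Pre_ excludes only num_sections = 0, where A raises ZeroDivisionError in divmod.
def Pre_to_sections (tokens : List String) (num_sections : Int) : Prop := num_sections ≠ 0
instance (tokens : List String) (num_sections : Int) : Decidable (Pre_to_sections tokens num_sections) := by unfold Pre_to_sections; infer_instance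
def pvWitness_to_sections : List String × Int := (["a", "b", "c"], 2)

def Spec_to_sections (tokens : List String) (num_sections : Int) (out : List (List String)) : Prop := out = to_sections_alt tokens num_sections
instance (tokens : List String) (num_sections : Int) (out : List (List String)) : Decidable (Spec_to_sections tokens num_sections out) := by unfold Spec_to_sections; infer_instance

-- ===== CLAIM =====
def Claim_equal_to_sections : Prop := ∀ (tokens : List String) (num_sections : Int), Dom_to_sections tokens num_sections → Pre_to_sections tokens num_sections → Spec_to_sections tokens num_sections (to_sections tokens num_sections)

-- ===== LEMMAS AND PROOFS =====

-- proof-only helper: the loop in recursive peel form (no accumulator)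
def pvChunks (tokens : List String) (k : Int) : List (List String) :=
  if k ≤ 0 then []
  else
    let size := PySem.Int.floordiv ((tokens.length : Int) + k - 1) k
    [PySem.List.slice tokens none (some size)] ++ pvChunks (PySem.List.slice tokens (some size) none) (k - 1)
termination_by k.toNat
decreasing_by omega

-- the accumulator loop over the iterator is the peel recursion
lemma pvChunksLoop_eq (n : Nat) : ∀ (k : Int), k.toNat = n →
    ∀ (sections : List (List String)) (rest : List String),
    pvChunksLoop sections rest (rest.length : Int) k = sections ++ pvChunks rest k := by
  induction n with
  | zero =>
    intro k hk sections rest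
    rw [pvChunksLoop, pvChunks, if_pos (by omega), if_pos (by omega)]
    simp
  | succ n ih =>
    intro k hk sections rest
    rw [pvChunksLoop, pvChunks, if_neg (by omega), if_neg (by omega)]
    simp only []
    have hkpos : 0 < k := by omega
    have hsize0 : 0 ≤ PySem.Int.floordiv ((rest.length : Int) + k - 1) k := by
      rw [PySem.Int.floordiv_eq_ediv_of_pos hkpos]
      exact Int.ediv_nonneg (by omega) (by omega)
    have hsizelen : PySem.Int.floordiv ((rest.length : Int) + k - 1) k ≤ (rest.length : Int) := by
      have h1 : ((rest.length : Int)) * 1 ≤ (rest.length : Int) * k :=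
        mul_le_mul_of_nonneg_left (by omega) (by omega)
      have h2 : ((rest.length : Int) + k - 1) / k < (rest.length : Int) + 1 :=
        (Int.ediv_lt_iff_lt_mul hkpos).mpr (by nlinarith)
      rw [PySem.Int.floordiv_eq_ediv_of_pos hkpos]
      omega
    rw [← PySem.List.slice_to rest hsize0, ← PySem.List.slice_from rest hsize0]
    have hrem : (rest.length : Int) - PySem.Int.floordiv ((rest.length : Int) + k - 1) k
        = (((PySem.List.slice rest (some (PySem.Int.floordiv ((rest.length : Int) + k - 1) k)) none).length : Nat) : Int) := by
      rw [PySem.List.slice_from rest hsize0, List.length_drop]; omega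
    rw [hrem, ih (k - 1) (by omega), List.append_assoc]

-- B's recursive peel produces exactly the closed-form slices: section i is
-- drop (i*q + min i r) then take (q + 1 if i < r), for length = m*q + r, r ≤ m.
lemma pvChunks_eq (m : Nat) : ∀ (toks : List String) (q r : Nat),
    toks.length = m * q + r → r ≤ m →
    pvChunks toks (m : Int)
      = (List.range m).map (fun i =>
          (toks.drop (i * q + min i r)).take (q + if i < r then 1 else 0)) := by
  induction m with
  | zero =>
    intro toks q r _ hr
    rw [pvChunks]
    simp
  | succ m ih =>
    intro toks q r hlen hr
    rw [pvChunks]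
    rw [if_neg (by omega : ¬ ((m + 1 : Nat) : Int) ≤ 0)]
    have hb : ∃ b : Nat, (b = if 0 < r then 1 else 0) := ⟨_, rfl⟩
    obtain ⟨b, hbdef⟩ := hb
    have hbf : (0 < r ∧ b = 1) ∨ (r = 0 ∧ b = 0) := by
      rcases Nat.eq_zero_or_pos r with h0 | h0
      · right; exact ⟨h0, by rw [hbdef, if_neg (by omega)]⟩
      · left; exact ⟨h0, by rw [hbdef, if_pos h0]⟩
    have hmq : (m + 1) * q = m * q + q := by ring
    have hnum : (toks.length : Int) + ((m + 1 : Nat) : Int) - 1 = ((((m + 1) * q + r + m : Nat)) : Int) := by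
      rw [hlen]; push_cast; ring
    have hdiv : PySem.Int.floordiv ((((m + 1) * q + r + m : Nat)) : Int) (((m + 1 : Nat)) : Int)
        = (((q + b : Nat)) : Int) := by
      rw [PySem.Int.floordiv_natCast]
      congr 1
      have h1 : (m + 1) * q + r + m = (m + 1) * q + (r + m) := by ring
      rw [h1, Nat.mul_add_div (by omega)]
      have h2 : (r + m) / (m + 1) = b := by
        rcases hbf with ⟨h0, hb⟩ | ⟨h0, hb⟩
        · have h3 : r + m = (r - 1) + (m + 1) := by omega
          rw [h3, Nat.add_div_right _ (by omega), Nat.div_eq_of_lt (by omega), hb]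
        · rw [h0, hb, Nat.zero_add, Nat.div_eq_of_lt (by omega)]
      rw [h2]
    rw [hnum, hdiv]
    simp only []
    rw [PySem.List.slice_to_natCast, PySem.List.slice_from_natCast]
    have hk1 : ((m + 1 : Nat) : Int) - 1 = (m : Int) := by push_cast; ring
    rw [hk1]
    rw [ih (toks.drop (q + b)) q (r - b)
      (by rw [List.length_drop, hlen]; rcases hbf with ⟨h0, hb⟩ | ⟨h0, hb⟩ <;> omega)
      (by rcases hbf with ⟨h0, hb⟩ | ⟨h0, hb⟩ <;> omega)]
    rw [List.range_succ_eq_map, List.map_cons, List.map_map]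
    simp only [List.singleton_append, List.cons_eq_cons]
    refine ⟨?_, ?_⟩
    · rcases hbf with ⟨h0, hb⟩ | ⟨h0, hb⟩ <;> simp [hb, h0]
    · apply List.map_congr_left
      intro i _
      simp only [Function.comp]
      rw [List.drop_drop]
      have hiq : (i + 1) * q = i * q + q := by ring
      simp only [Nat.succ_eq_add_one]
      have harg : q + b + (i * q + min i (r - b)) = (i + 1) * q + min (i + 1) r := by
        rcases hbf with ⟨h0, hb⟩ | ⟨h0, hb⟩ <;> omega
      have hcond : (i < r - b) = (i + 1 < r) := by
        rcases hbf with ⟨h0, hb⟩ | ⟨h0, hb⟩ <;> (apply propext; omega)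
      rw [harg]
      simp only [hcond]

-- per-section slice of A's closed-form bounds equals drop/take of the balanced sizes
lemma pvElem_eq (toks : List String) (q r i : Nat) :
    PySem.List.slice toks
      (some (if (i : Int) < (r : Int) then (i : Int) * (q : Int) + (i : Int)
             else (i : Int) * (q : Int) + (r : Int)))
      (some (if (i : Int) + 1 < (r : Int) then ((i : Int) + 1) * (q : Int) + (i : Int) + 1
             else ((i : Int) + 1) * (q : Int) + (r : Int)))
    = (toks.drop (i * q + min i r)).take (q + if i < r then 1 else 0) := by
  have hS : (if (i : Int) < (r : Int) then (i : Int) * (q : Int) + (i : Int)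
        else (i : Int) * (q : Int) + (r : Int))
      = ((i * q + min i r : Nat) : Int) := by
    split_ifs with h
    · rw [show min i r = i by omega]; push_cast; ring
    · rw [show min i r = r by omega]; push_cast; ring
  have hT : (if (i : Int) + 1 < (r : Int) then ((i : Int) + 1) * (q : Int) + (i : Int) + 1
        else ((i : Int) + 1) * (q : Int) + (r : Int))
      = (((i + 1) * q + min (i + 1) r : Nat) : Int) := by
    split_ifs with h
    · rw [show min (i + 1) r = i + 1 by omega]; push_cast; ring
    · rw [show min (i + 1) r = r by omega]; push_cast; ring
  have hsub : ((i + 1) * q + min (i + 1) r) - (i * q + min i r)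
      = q + (if i < r then 1 else 0) := by
    have he : (i + 1) * q = i * q + q := by ring
    split_ifs with h <;> omega
  rw [hS, hT, PySem.List.slice_natCast, hsub]

-- ===== VERDICT =====
theorem to_sections_spec : Claim_equal_to_sections := by
  intro tokens num_sections _ hpre
  unfold Pre_to_sections at hpre
  unfold Spec_to_sections
  simp only [to_sections, to_sections_alt]
  by_cases hge : (tokens.length : Int) ≥ num_sections
  · rw [if_pos hge, if_neg (by omega)]
    rw [pvChunksLoop_eq num_sections.toNat num_sections rfl, List.nil_append]
    by_cases hpos : 0 < num_sections
    · obtain ⟨m, rfl⟩ : ∃ m : Nat, num_sections = (m : Int) :=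
        ⟨num_sections.toNat, by omega⟩
      have hm0 : 0 < m := by omega
      rw [PySem.Int.floordiv_natCast, PySem.Int.mod_natCast]
      rw [PySem.List.foldl_append_singleton_eq_map]
      rw [PySem.List.pyRange_one]
      rw [show (((m : Int) - 0).toNat) = m by omega]
      rw [List.map_map]
      rw [pvChunks_eq m tokens (tokens.length / m) (tokens.length % m)
        (Nat.div_add_mod tokens.length m).symm
        (le_of_lt (Nat.mod_lt tokens.length hm0))]
      apply List.map_congr_left
      intro i hi
      simp only [Function.comp, zero_add]
      exact pvElem_eq tokens (tokens.length / m) (tokens.length % m) i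
    · have hneg : num_sections < 0 := by omega
      rw [PySem.List.pyRange_one_eq_nil (by omega)]
      rw [pvChunks, if_pos (by omega)]
      simp
  · rw [if_neg hge, if_pos (by omega)]
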